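-- pv_equiv track=rewrite | github.com/jkazimzade21/baku-reserve-mvp | tools/concierge/generate_tag_groups.py | finalize_categories
-- ===== SOURCE A (Python) =====
-- CATEGORY_LIMITS = {
--     "core_identity": 9,
--     "ambiance_vibe": 9,
--     "experiences_amenities": 9,
--     "temporal_contextual": 7,
--     "dietary": 6,
--     "cultural_local_specific": 7,
-- }
--
-- def finalize_categories(
--     candidates: dict[str, set[str]], manual_tags: dict[str, list[str]]
-- ) -> dict[str, list[str]]:
--     finalized: dict[str, list[str]] = {}
--     for category, values in candidates.items():
--         base_tags = manual_tags.get(category, [])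
--         limit = CATEGORY_LIMITS.get(category)
--         ordered: list[str] = []
--         seen: set[str] = set()
--
--         for tag in base_tags:
--             if tag in values and tag not in seen:
--                 ordered.append(tag)
--                 seen.add(tag)
--
--         extras = sorted(values - seen)
--         ordered.extend(extras)
--         if limit:
--             ordered = ordered[:limit]
--         finalized[category] = ordered
--     return finalized
-- ===== SOURCE B (Python) =====
-- CATEGORY_LIMITS = {
--     "core_identity": 9,
--     "ambiance_vibe": 9,
--     "experiences_amenities": 9,
--     "temporal_contextual": 7,
--     "dietary": 6,
--     "cultural_local_specific": 7,
-- }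
--
-- def finalize_categories(
--     candidates: dict[str, set[str]], manual_tags: dict[str, list[str]]
-- ) -> dict[str, list[str]]:
--     # One keyed sort per category: base tags by first-occurrence priority, extras
--     # alphabetically after them (rank = len(base_tags) for tags outside base_tags).
--     finalized: dict[str, list[str]] = {}
--     for category, values in candidates.items():
--         base_tags = manual_tags.get(category, [])
--         n = len(base_tags)
--         rank: dict[str, int] = {}
--         for i, tag in enumerate(base_tags):
--             if tag not in rank:
--                 rank[tag] = i
--         ordered = sorted(values, key=lambda t: (rank.get(t, n), t))
--         limit = CATEGORY_LIMITS.get(category)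
--         finalized[category] = ordered[:limit] if limit else ordered
--     return finalized
-- ===== Notes on version B (the rewrite author's own statement) =====
-- stated objective: alternative
-- what changed: A's per-category order-preserving membership loop with a seen-set plus a separate sort of the set difference is replaced by a single keyed sort of the whole values set under a precomputed first-occurrence priority table (base tags rank by position, extras rank len(base_tags) and tie-break alphabetically).
import Mathlib
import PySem

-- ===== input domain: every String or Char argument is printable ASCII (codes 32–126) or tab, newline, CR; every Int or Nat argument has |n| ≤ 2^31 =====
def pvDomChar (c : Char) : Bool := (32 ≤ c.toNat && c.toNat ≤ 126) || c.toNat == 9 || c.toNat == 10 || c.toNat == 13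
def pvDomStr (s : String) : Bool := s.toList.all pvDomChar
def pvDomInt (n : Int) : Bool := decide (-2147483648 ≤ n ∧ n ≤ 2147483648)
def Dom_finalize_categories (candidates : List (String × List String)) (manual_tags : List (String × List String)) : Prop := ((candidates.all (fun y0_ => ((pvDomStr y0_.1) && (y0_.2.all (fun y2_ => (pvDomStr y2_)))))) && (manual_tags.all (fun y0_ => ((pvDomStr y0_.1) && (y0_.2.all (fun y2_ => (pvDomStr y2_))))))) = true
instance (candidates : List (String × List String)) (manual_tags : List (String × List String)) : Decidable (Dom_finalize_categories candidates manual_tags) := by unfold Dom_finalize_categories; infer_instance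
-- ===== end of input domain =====

-- B replaces A's order-preserving membership loop + set-difference sort by ONE keyed sort per
-- category over a precomputed first-occurrence priority table (objective: alternative decomposition).

def CATEGORY_LIMITS : PySem.Dict String Int := PySem.Dict.mk
  [("core_identity", 9), ("ambiance_vibe", 9), ("experiences_amenities", 9),
   ("temporal_contextual", 7), ("dietary", 6), ("cultural_local_specific", 7)]

-- ===== PORT A =====
def finalize_categories (candidates : List (String × List String)) (manual_tags : List (String × List String)) : List (String × List String) :=
  (candidates.foldl (fun (finalized : PySem.Dict String (List String)) cv =>
      let category := cv.1
      let values := cv.2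
      let base_tags := (PySem.Dict.mk manual_tags).getD category []
      let limit := CATEGORY_LIMITS.get? category
      -- for tag in base_tags: if tag in values and tag not in seen: ordered.append(tag); seen.add(tag)
      let st := base_tags.foldl
        (fun (st : List String × PySem.Set String) tag =>
          if tag ∈ values ∧ tag ∉ st.2 then (st.1 ++ [tag], PySem.Set.add st.2 tag) else st)
        ([], PySem.Set.empty)
      -- extras = sorted(values - seen); ordered.extend(extras)
      let extras := PySem.List.sorted (PySem.Set.diff values st.2) (fun t => t) false
      let ordered := st.1 ++ extras
      -- if limit: ordered = ordered[:limit]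
      let ordered := match limit with
        | some l => if l ≠ 0 then PySem.List.slice ordered none (some l) else ordered
        | none => ordered
      finalized.insert category ordered)
    PySem.Dict.empty).items

-- ===== PORT B =====
def finalize_categories_alt (candidates : List (String × List String)) (manual_tags : List (String × List String)) : List (String × List String) :=
  (candidates.foldl (fun (finalized : PySem.Dict String (List String)) cv =>
      let category := cv.1
      let values := cv.2
      let base_tags := (PySem.Dict.mk manual_tags).getD category []
      let n : Int := base_tags.length
      -- rank = {}; for i, tag in enumerate(base_tags): if tag not in rank: rank[tag] = i
      let rank := (PySem.List.enumerate base_tags).foldl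
        (fun (d : PySem.Dict String Int) p => if d.contains p.2 then d else d.insert p.2 p.1)
        PySem.Dict.empty
      -- ordered = sorted(values, key=lambda t: (rank.get(t, n), t))   (Python tuple order = Lex)
      let ordered := PySem.List.sorted values (fun t => toLex (rank.getD t n, t)) false
      let limit := CATEGORY_LIMITS.get? category
      -- finalized[category] = ordered[:limit] if limit else ordered
      finalized.insert category (match limit with
        | some l => if l ≠ 0 then PySem.List.slice ordered none (some l) else ordered
        | none => ordered))
    PySem.Dict.empty).items

-- ===== PRECONDITION & SPEC =====
-- Pre_ only says that each candidates value list holds distinct elements: it models a Python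
-- set[str], which cannot contain duplicates, so no input of A's actual domain is excluded.
def Pre_finalize_categories (candidates : List (String × List String)) (manual_tags : List (String × List String)) : Prop :=
  ∀ p ∈ candidates, (p.2 : List String).Nodup
instance (candidates : List (String × List String)) (manual_tags : List (String × List String)) : Decidable (Pre_finalize_categories candidates manual_tags) := by unfold Pre_finalize_categories; infer_instance

def pvWitness_finalize_categories : (List (String × List String)) × (List (String × List String)) :=
  ([("dietary", ["vegan", "halal", "raw"]), ("other", ["b", "a"])],
   [("dietary", ["halal", "vegan", "kosher"])])

def Spec_finalize_categories (candidates : List (String × List String)) (manual_tags : List (String × List String)) (out : List (String × List String)) : Prop := out = finalize_categories_alt candidates manual_tags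
instance (candidates : List (String × List String)) (manual_tags : List (String × List String)) (out : List (String × List String)) : Decidable (Spec_finalize_categories candidates manual_tags out) := by unfold Spec_finalize_categories; infer_instance

-- ===== CLAIM (what is proved, stated in full; the proofs are below) =====
def Claim_equal_finalize_categories : Prop := ∀ (candidates : List (String × List String)) (manual_tags : List (String × List String)), Dom_finalize_categories candidates manual_tags → Pre_finalize_categories candidates manual_tags → Spec_finalize_categories candidates manual_tags (finalize_categories candidates manual_tags)

-- ===== LEMMAS AND PROOFS =====

-- PySem.Set.ofList commutes with filtering by an element-wise predicate.
theorem ofList_filter (xs : List String) (p : String → Bool) :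
    PySem.Set.ofList (xs.filter p) = (PySem.Set.ofList xs).filter p := by
  induction xs with
  | nil => rfl
  | cons x r ih =>
    by_cases hp : p x
    · simp only [List.filter_cons, hp, if_pos, PySem.Set.ofList_cons, ih, PySem.Set.discard, List.filter_filter]
      congr 1
      apply List.filter_congr
      intro a _
      rw [Bool.and_comm]
    · simp only [List.filter_cons, hp, PySem.Set.ofList_cons, Bool.false_eq_true,
        ite_false, ih, PySem.Set.discard, List.filter_filter]
      apply List.filter_congr
      intro a _
      by_cases hax : a = x
      · subst hax; simp [hp]
      · simp [hax]

-- Closed form of A's seen/ordered loop.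
theorem loopA_eq (vs : List String) : ∀ (base acc : List String) (seen : PySem.Set String),
    base.foldl
      (fun (st : List String × PySem.Set String) tag =>
        if tag ∈ vs ∧ tag ∉ st.2 then (st.1 ++ [tag], PySem.Set.add st.2 tag) else st)
      (acc, seen)
    = (acc ++ PySem.List.dedup (base.filter (fun t => decide (t ∈ vs) && !(PySem.Set.contains seen t))),
       PySem.Set.update seen (base.filter (fun t => decide (t ∈ vs)))) := by
  intro base
  induction base with
  | nil => intro acc seen; simp [PySem.Set.update_nil]
  | cons t r ih =>
    intro acc seen
    simp only [List.foldl_cons]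
    by_cases hv : t ∈ vs
    · by_cases hs : t ∈ seen
      · have hc : PySem.Set.contains seen t = true := (PySem.Set.contains_iff seen t).mpr hs
        rw [if_neg (by simp [hs])]
        rw [ih]
        simp only [List.filter_cons, hv, decide_true, hc, Bool.not_true, Bool.and_false,
          Bool.false_eq_true, ite_false, ite_true]
        rw [PySem.Set.update_cons, PySem.Set.add_of_mem hs]
      · have hc : PySem.Set.contains seen t = false := by
          rw [Bool.eq_false_iff]
          intro h; exact hs ((PySem.Set.contains_iff seen t).mp h)
        rw [if_pos ⟨hv, hs⟩]
        rw [ih]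
        simp only [List.filter_cons, hv, decide_true, hc, Bool.not_false, Bool.and_true, ite_true]
        rw [PySem.Set.update_cons]
        refine Prod.ext ?_ rfl
        simp only
        -- first component
        rw [PySem.Set.add_of_not_mem hs]
        simp only [PySem.List.dedup_eq_ofList, PySem.Set.ofList_cons]
        simp only [List.append_assoc, List.singleton_append]
        congr 2
        have : (List.filter (fun x => decide (x ∈ vs) && !PySem.Set.contains (seen ++ [t]) x) r)
             = (List.filter (fun x => decide (x ∈ vs) && !PySem.Set.contains seen x) r).filter (fun x => !(x == t)) := by
          rw [List.filter_filter]
          apply List.filter_congr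
          intro a _
          simp only [PySem.Set.contains, List.contains_append, List.contains_cons,
            List.contains_nil, Bool.or_false]
          cases h1 : decide (a ∈ vs) <;> cases h2 : List.contains seen a <;> cases h3 : a == t <;> simp
        rw [this, ofList_filter, PySem.Set.discard]
    · rw [if_neg (by simp [hv])]
      rw [ih]
      simp [hv]

-- Closed form of B's first-occurrence rank dictionary lookup.
theorem rankB_getD (t : String) (n : Int) : ∀ (base : List String) (s : Int) (d : PySem.Dict String Int),
    ((PySem.List.enumerate base s).foldl
      (fun (d : PySem.Dict String Int) p => if d.contains p.2 then d else d.insert p.2 p.1) d).getD t n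
    = if d.contains t then d.getD t n
      else if t ∈ base then s + (List.idxOf t base : Int) else n := by
  intro base
  induction base with
  | nil =>
    intro s d
    simp only [PySem.List.enumerate_nil, List.foldl_nil, List.not_mem_nil, if_false]
    by_cases hdt : d.contains t
    · rw [if_pos hdt]
    · rw [if_neg hdt, PySem.Dict.getD_of_not_contains d n (Bool.eq_false_iff.mpr hdt)]
  | cons x r ih =>
    intro s d
    rw [PySem.List.enumerate_cons]
    simp only [List.foldl_cons]
    by_cases hd : d.contains x
    · rw [if_pos hd, ih]
      by_cases hdt : d.contains t
      · rw [if_pos hdt, if_pos hdt]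
      · rw [if_neg hdt, if_neg hdt]
        by_cases hxt : t = x
        · subst hxt; exact absurd hd (by simpa using hdt)
        · rw [List.idxOf_cons_ne _ (by simpa using Ne.symm hxt)]
          by_cases hm : t ∈ r
          · rw [if_pos hm, if_pos (List.mem_cons_of_mem _ hm)]
            push_cast; ring
          · rw [if_neg hm, if_neg (by simp [hxt, hm])]
    · rw [if_neg hd, ih]
      by_cases hxt : t = x
      · subst hxt
        rw [if_pos (PySem.Dict.contains_insert_self d t s),
          PySem.Dict.getD_insert_self, if_neg (by simpa using hd),
          if_pos (List.mem_cons_self), List.idxOf_cons_self]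
        simp
      · have hcon : (d.insert x s).contains t = d.contains t := by
          rw [PySem.Dict.contains_insert]
          simp [hxt]
        rw [hcon]
        by_cases hdt : d.contains t
        · rw [if_pos hdt, if_pos hdt, PySem.Dict.getD_insert_of_ne d s n hxt]
        · rw [if_neg hdt, if_neg hdt, List.idxOf_cons_ne _ (by simpa using Ne.symm hxt)]
          by_cases hm : t ∈ r
          · rw [if_pos hm, if_pos (List.mem_cons_of_mem _ hm)]
            push_cast; ring
          · rw [if_neg hm, if_neg (by simp [hxt, hm])]

-- PySem.List.dedup lists elements in strictly increasing order of first occurrence.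
theorem dedup_pairwise_idxOf (xs : List String) :
    (PySem.List.dedup xs).Pairwise (fun a b => List.idxOf a xs < List.idxOf b xs) := by
  induction xs with
  | nil => simp [PySem.List.dedup]
  | cons x r ih =>
    simp only [PySem.List.dedup_eq_ofList, PySem.Set.ofList_cons]
    constructor
    · intro b hb
      have hbr : b ∈ PySem.Set.ofList r ∧ b ≠ x := by
        simpa using (PySem.Set.mem_discard (PySem.Set.ofList r) x b).mp hb
      rw [List.idxOf_cons_self, List.idxOf_cons_ne _ (by simpa using Ne.symm hbr.2)]
      omega
    · have ihf : ((PySem.Set.ofList r).discard x).Pairwise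
          (fun a b => List.idxOf a r < List.idxOf b r) := by
        rw [PySem.Set.discard]
        exact (by simpa [PySem.List.dedup_eq_ofList] using ih : (PySem.Set.ofList r).Pairwise _).filter _
      refine List.Pairwise.imp_of_mem ?_ ihf
      intro a b ha hb hlt
      have ha' := (PySem.Set.mem_discard (PySem.Set.ofList r) x a).mp ha
      have hb' := (PySem.Set.mem_discard (PySem.Set.ofList r) x b).mp hb
      rw [List.idxOf_cons_ne _ (by simpa using Ne.symm ha'.2),
          List.idxOf_cons_ne _ (by simpa using Ne.symm hb'.2)]
      omega

-- Per-category core: A's ordered list (before the limit slice) equals B's single keyed sort.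
theorem core_eq (vs base : List String) (hnd : vs.Nodup) :
    (base.foldl
      (fun (st : List String × PySem.Set String) tag =>
        if tag ∈ vs ∧ tag ∉ st.2 then (st.1 ++ [tag], PySem.Set.add st.2 tag) else st)
      ([], PySem.Set.empty)).1
    ++ PySem.List.sorted (PySem.Set.diff vs
        (base.foldl
          (fun (st : List String × PySem.Set String) tag =>
            if tag ∈ vs ∧ tag ∉ st.2 then (st.1 ++ [tag], PySem.Set.add st.2 tag) else st)
          ([], PySem.Set.empty)).2) (fun t => t) false
    = PySem.List.sorted vs
        (fun t => toLex (((PySem.List.enumerate base).foldl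
            (fun (d : PySem.Dict String Int) p => if d.contains p.2 then d else d.insert p.2 p.1)
            PySem.Dict.empty).getD t (base.length : Int), t)) false := by
  rw [loopA_eq]
  have hfe : (base.filter (fun t => decide (t ∈ vs) && !(PySem.Set.contains PySem.Set.empty t)))
      = base.filter (fun t => decide (t ∈ vs)) := by
    apply List.filter_congr
    intro a _
    simp [PySem.Set.empty, PySem.Set.contains]
  rw [hfe]
  simp only [PySem.Set.update_empty]
  set p : String → Bool := fun t => decide (t ∈ vs) with hp
  set L1 := PySem.List.dedup (base.filter p) with hL1
  set S := PySem.Set.ofList (base.filter p) with hS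
  set E := PySem.List.sorted (PySem.Set.diff vs S) (fun t => t) false with hE
  have hrank : ∀ u, ((PySem.List.enumerate base).foldl
      (fun (d : PySem.Dict String Int) p => if d.contains p.2 then d else d.insert p.2 p.1)
      PySem.Dict.empty).getD u (base.length : Int)
      = if u ∈ base then (List.idxOf u base : Int) else (base.length : Int) := by
    intro u
    rw [rankB_getD u (base.length : Int) base 0 PySem.Dict.empty]
    rw [if_neg (by simp [PySem.Dict.contains_empty])]
    by_cases h : u ∈ base
    · rw [if_pos h, if_pos h, zero_add]
    · rw [if_neg h, if_neg h]
  have memL1 : ∀ u, u ∈ L1 ↔ u ∈ base ∧ u ∈ vs := by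
    intro u
    simp [hL1, List.mem_filter, hp]
  have memS : ∀ u, u ∈ S ↔ u ∈ base ∧ u ∈ vs := by
    intro u
    simp [hS, PySem.Set.mem_ofList, List.mem_filter, hp]
  have memE : ∀ u, u ∈ E ↔ u ∈ vs ∧ u ∉ base := by
    intro u
    rw [hE, PySem.List.mem_sorted, PySem.Set.mem_diff, memS]
    tauto
  have nodupL1 : L1.Nodup := by rw [hL1, PySem.List.dedup_eq_ofList]; exact PySem.Set.nodup_ofList _
  have nodupE : E.Nodup := by
    have : (PySem.Set.diff vs S).Nodup := by
      rw [PySem.Set.diff]; exact hnd.filter _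
    rw [hE]
    exact ((PySem.List.sorted_perm _ _ _).symm).nodup this
  have hdisj : ∀ u ∈ L1, u ∉ E := by
    intro u hu hue
    exact ((memE u).mp hue).2 ((memL1 u).mp hu).1
  have hperm : (L1 ++ E).Perm vs := by
    rw [List.perm_ext_iff_of_nodup (List.nodup_append.mpr ⟨nodupL1, nodupE, by
      intro a ha b hb hab; subst hab; exact hdisj a ha hb⟩) hnd]
    intro u
    simp only [List.mem_append, memL1, memE]
    tauto
  have hpair : (L1 ++ E).Pairwise (fun a b =>
      (fun t => toLex ((if t ∈ base then (List.idxOf t base : Int) else (base.length : Int)), t)) a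
      < (fun t => toLex ((if t ∈ base then (List.idxOf t base : Int) else (base.length : Int)), t)) b) := by
    rw [List.pairwise_append]
    refine ⟨?_, ?_, ?_⟩
    · -- within L1: strictly increasing idxOf
      have base_pw := (dedup_pairwise_idxOf base)
      have : L1.Pairwise (fun a b => List.idxOf a base < List.idxOf b base) := by
        rw [hL1, PySem.List.dedup_eq_ofList, ofList_filter, ← PySem.List.dedup_eq_ofList]
        exact base_pw.filter p
      refine this.imp_of_mem ?_
      intro a b ha hb hab
      have ha' := (memL1 a).mp (by rwa [hL1] at ha)
      have hb' := (memL1 b).mp (by rwa [hL1] at hb)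
      rw [Prod.Lex.toLex_lt_toLex]
      left
      simp only [if_pos ha'.1, if_pos hb'.1]
      exact_mod_cast hab
    · -- within E: alphabetical
      have : E.Pairwise (fun a b => a < b) := by
        rw [hE, ← PySem.Set.ofList_eq_self_of_nodup (PySem.Set.diff vs S) (by rw [PySem.Set.diff]; exact hnd.filter _)]
        exact PySem.List.sorted_ofList_pairwise_lt _
      refine this.imp_of_mem ?_
      intro a b ha hb hab
      have ha' := (memE a).mp (by rwa [hE] at ha)
      have hb' := (memE b).mp (by rwa [hE] at hb)
      rw [Prod.Lex.toLex_lt_toLex]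
      right
      simp only [if_neg ha'.2, if_neg hb'.2]
      exact ⟨by trivial, hab⟩
    · -- across
      intro a ha b hb
      have ha' := (memL1 a).mp ha
      have hb' := (memE b).mp hb
      rw [Prod.Lex.toLex_lt_toLex]
      left
      simp only [if_pos ha'.1, if_neg hb'.2]
      exact_mod_cast List.idxOf_lt_length_of_mem ha'.1
  refine (PySem.List.sorted_eq_of_perm_of_pairwise_lt vs (L1 ++ E) _ hperm ?_).symm
  simp only [hrank]
  exact hpair

-- ===== VERDICT (by name: the statement is the Claim_ definition above) =====
theorem finalize_categories_spec : Claim_equal_finalize_categories := by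
  intro candidates manual_tags _ hpre
  unfold Spec_finalize_categories finalize_categories finalize_categories_alt
  congr 1
  apply PySem.List.foldl_congr_mem
  intro acc cv hcv
  simp only
  rw [core_eq cv.2 ((PySem.Dict.mk manual_tags).getD cv.1 []) (hpre cv hcv)]
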